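-- pv_equiv track=rewrite | github.com/Tosaaaki/QuantRabbit | utils/strategy_tags.py | _match_known
-- ===== SOURCE A (Python) =====
-- from typing import Any, Iterable
--
-- def normalize_strategy_lookup_key(raw: str | None) -> str:
--     return "".join(ch.lower() for ch in str(raw or "") if ch.isalnum())
--
-- def _known_values(known_keys: Iterable[str] | None) -> tuple[str, ...]:
--     if not known_keys:
--         return tuple()
--     values: list[str] = []
--     for item in known_keys:
--         text = str(item or "").strip()
--         if text and text not in values:
--             values.append(text)
--     return tuple(values)
--
-- def _match_known(text: str, known_keys: Iterable[str] | None) -> str: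
--     known = _known_values(known_keys)
--     if not known:
--         return text
--
--     lowered = text.lower()
--     lookup = normalize_strategy_lookup_key(text)
--     exact_match = ""
--     exact_lookup_match = ""
--     prefix_match = ""
--     prefix_lookup_match = ""
--     prefix_lookup_len = -1
--
--     for candidate in known:
--         cand_lower = candidate.lower()
--         cand_lookup = normalize_strategy_lookup_key(candidate)
--         if lowered == cand_lower:
--             exact_match = candidate
--             break
--         if lookup and lookup == cand_lookup:
--             exact_lookup_match = candidate
--         if lowered.startswith(cand_lower):
--             next_char = lowered[len(cand_lower) : len(cand_lower) + 1]
--             if not next_char or next_char in {"-", "_", "/", " "}: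
--                 if len(candidate) > len(prefix_match):
--                     prefix_match = candidate
--         if lookup and cand_lookup and lookup.startswith(cand_lookup):
--             if len(cand_lookup) > prefix_lookup_len:
--                 prefix_lookup_len = len(cand_lookup)
--                 prefix_lookup_match = candidate
--
--     if exact_match:
--         return exact_match
--     if exact_lookup_match:
--         return exact_lookup_match
--     if prefix_match:
--         return prefix_match
--     if prefix_lookup_match:
--         return prefix_lookup_match
--     return text
-- ===== SOURCE B (Python) =====
-- from typing import Iterable
--
-- def normalize_strategy_lookup_key(raw: str | None) -> str:
--     return "".join(ch.lower() for ch in str(raw or "") if ch.isalnum())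
--
-- def _known_values(known_keys: Iterable[str] | None) -> tuple[str, ...]:
--     if not known_keys:
--         return tuple()
--     values: list[str] = []
--     for item in known_keys:
--         text = str(item or "").strip()
--         if text and text not in values:
--             values.append(text)
--     return tuple(values)
--
-- def _match_known(text: str, known_keys: Iterable[str] | None) -> str:
--     known = _known_values(known_keys)
--     if not known:
--         return text
--
--     lowered = text.lower()
--     lookup = normalize_strategy_lookup_key(text)
--
--     # pass 1: first exact (case-insensitive) match
--     for cand in known:
--         if cand.lower() == lowered:
--             return cand
--
--     # pass 2: LAST candidate whose normalized key equals the (nonempty) lookup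
--     if lookup:
--         for cand in reversed(known):
--             if normalize_strategy_lookup_key(cand) == lookup:
--                 return cand
--
--     # pass 3: longest candidate that is a word-boundary prefix of the text
--     best = ""
--     for cand in known:
--         cl = cand.lower()
--         if lowered.startswith(cl):
--             nc = lowered[len(cl):len(cl) + 1]
--             if not nc or nc in {"-", "_", "/", " "}:
--                 if len(cand) > len(best):
--                     best = cand
--     if best:
--         return best
--
--     # pass 4: candidate with the longest nonempty normalized key prefixing lookup
--     best, best_len = "", -1
--     for cand in known:
--         ck = normalize_strategy_lookup_key(cand)
--         if ck and lookup.startswith(ck) and len(ck) > best_len: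
--             best, best_len = cand, len(ck)
--     if best:
--         return best
--
--     return text
-- ===== Notes on version B (the rewrite author's own statement) =====
-- stated objective: alternative
-- what changed: Replaces the single accumulator loop (five pieces of running state plus break) with four independent priority-ordered passes: first exact match, last exact-lookup match via a reversed scan, longest boundary-prefix via a fold, longest normalized-key prefix via a fold.
import Mathlib
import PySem

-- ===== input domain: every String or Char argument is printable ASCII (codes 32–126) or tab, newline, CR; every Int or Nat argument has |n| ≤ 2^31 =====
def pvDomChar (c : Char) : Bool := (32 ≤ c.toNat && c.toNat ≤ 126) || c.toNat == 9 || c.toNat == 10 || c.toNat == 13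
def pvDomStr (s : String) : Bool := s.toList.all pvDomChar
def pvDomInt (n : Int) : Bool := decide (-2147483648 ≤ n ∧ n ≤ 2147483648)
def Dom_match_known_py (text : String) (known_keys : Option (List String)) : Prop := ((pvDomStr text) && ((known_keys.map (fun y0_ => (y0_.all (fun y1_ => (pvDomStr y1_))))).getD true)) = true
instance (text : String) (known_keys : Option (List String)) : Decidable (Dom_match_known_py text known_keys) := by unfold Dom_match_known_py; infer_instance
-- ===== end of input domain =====

-- B replaces A's single five-accumulator loop with four independent priority-ordered passes
-- (objective: alternative decomposition, same cost). Return values only; nothing is mutated.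

-- shared module helpers (both Pythons use the module's normalize_strategy_lookup_key / _known_values unchanged)
-- normalize_strategy_lookup_key: keep alphanumerics, lower each char ('raw or ""' is the identity on the str inputs used here)
def normKey (s : String) : List Char :=
  (s.toList.filter PySem.Chars.isalnum).map PySem.Chars.lowerChar

-- _known_values: ordered dedup of the stripped nonempty entries
def knownValues (known_keys : Option (List String)) : List String :=
  match known_keys with
  | none => []
  | some l =>
    if l = [] then []
    else l.foldl (fun values item =>
      let t := PySem.Str.strip (if item = "" then "" else item)
      if t ≠ "" ∧ t ∉ values then values ++ [t] else values) []

-- ===== PORT A =====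
-- A's single loop: state (exact, exact_lookup, prefix, prefix_lookup, prefix_lookup_len); break = early return
def loopA (lowered lookup : List Char) (st : String × String × String × String × Int) :
    List String → String × String × String × String × Int
  | [] => st
  | c :: rest =>
    let (ex, el, pm, plm, pll) := st
    let cl := PySem.Chars.lower c.toList
    let ck := normKey c
    if lowered = cl then (c, el, pm, plm, pll)   -- exact_match = candidate; break
    else
      let el' := if lookup ≠ [] ∧ lookup = ck then c else el
      let pm' :=
        if PySem.Chars.startswith lowered cl then
          let nc := PySem.List.slice lowered (some (cl.length : Int)) (some ((cl.length : Int) + 1))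
          if nc = [] ∨ nc = ['-'] ∨ nc = ['_'] ∨ nc = ['/'] ∨ nc = [' '] then
            if pm.toList.length < c.toList.length then c else pm
          else pm
        else pm
      let plmp :=
        if lookup ≠ [] ∧ ck ≠ [] ∧ PySem.Chars.startswith lookup ck then
          if pll < (ck.length : Int) then (c, (ck.length : Int)) else (plm, pll)
        else (plm, pll)
      loopA lowered lookup (ex, el', pm', plmp.1, plmp.2) rest

def match_known_py (text : String) (known_keys : Option (List String)) : String :=
  let known := knownValues known_keys
  if known = [] then text
  else
    let lowered := PySem.Chars.lower text.toList
    let lookup := normKey text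
    let (ex, el, pm, plm, _) := loopA lowered lookup ("", "", "", "", -1) known
    if ex ≠ "" then ex
    else if el ≠ "" then el
    else if pm ≠ "" then pm
    else if plm ≠ "" then plm
    else text

-- ===== PORT B =====
-- pass 3 step: keep the longest word-boundary prefix candidate (first on ties, strict >)
def passPrefixStep (lowered : List Char) (best c : String) : String :=
  let cl := PySem.Chars.lower c.toList
  if PySem.Chars.startswith lowered cl then
    let nc := PySem.List.slice lowered (some (cl.length : Int)) (some ((cl.length : Int) + 1))
    if nc = [] ∨ nc = ['-'] ∨ nc = ['_'] ∨ nc = ['/'] ∨ nc = [' '] then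
      if best.toList.length < c.toList.length then c else best
    else best
  else best

-- pass 4 step: keep the candidate with the longest nonempty normalized key prefixing lookup
def passLookupStep (lookup : List Char) (acc : String × Int) (c : String) : String × Int :=
  let ck := normKey c
  if ck ≠ [] ∧ PySem.Chars.startswith lookup ck ∧ acc.2 < (ck.length : Int) then
    (c, (ck.length : Int))
  else acc

def match_known_py_alt (text : String) (known_keys : Option (List String)) : String :=
  let known := knownValues known_keys
  if known = [] then text
  else
    let lowered := PySem.Chars.lower text.toList
    let lookup := normKey text
    match known.find? (fun c => PySem.Chars.lower c.toList == lowered) with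
    | some c => c
    | none =>
      match (if lookup ≠ [] then known.reverse.find? (fun c => normKey c == lookup) else none) with
      | some c => c
      | none =>
        let best := known.foldl (passPrefixStep lowered) ""
        if best ≠ "" then best
        else
          let best4 := if lookup ≠ [] then known.foldl (passLookupStep lookup) ("", -1) else ("", -1)
          if best4.1 ≠ "" then best4.1 else text

-- ===== PRECONDITION & SPEC =====
def Spec_match_known_py (text : String) (known_keys : Option (List String)) (out : String) : Prop := out = match_known_py_alt text known_keys
instance (text : String) (known_keys : Option (List String)) (out : String) : Decidable (Spec_match_known_py text known_keys out) := by unfold Spec_match_known_py; infer_instance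

-- ===== CLAIM (what is proved, stated in full; the proofs are below) =====
def Claim_equal_match_known_py : Prop := ∀ (text : String) (known_keys : Option (List String)), Dom_match_known_py text known_keys → Spec_match_known_py text known_keys (match_known_py text known_keys)

-- ===== LEMMAS AND PROOFS =====

-- pass-2 result generalized over a default accumulator
def elFinal (lookup : List Char) (known : List String) (el : String) : String :=
  ((if lookup ≠ [] then known.reverse.find? (fun c => normKey c == lookup) else none)).getD el

-- B's tail (passes 2-4 plus the fallback), generalized over the running accumulators
def altCore (lowered lookup : List Char) (text : String)
    (el pm plm : String) (pll : Int) (known : List String) : String :=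
  match known.find? (fun c => PySem.Chars.lower c.toList == lowered) with
  | some c => c
  | none =>
    if elFinal lookup known el ≠ "" then elFinal lookup known el
    else if known.foldl (passPrefixStep lowered) pm ≠ "" then known.foldl (passPrefixStep lowered) pm
    else if (known.foldl (passLookupStep lookup) (plm, pll)).1 ≠ "" then (known.foldl (passLookupStep lookup) (plm, pll)).1
    else text

lemma startswith_nil_iff (ck : List Char) : PySem.Chars.startswith [] ck = true ↔ ck = [] := by
  rw [PySem.Chars.startswith_iff]
  exact ⟨List.prefix_nil.mp, fun h => h ▸ List.nil_prefix⟩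

-- A's per-candidate update of (prefix_lookup_match, prefix_lookup_len) is B's pass-4 step
lemma stepLookup_eq (lookup : List Char) (plm : String) (pll : Int) (c : String) :
    (if lookup ≠ [] ∧ normKey c ≠ [] ∧ PySem.Chars.startswith lookup (normKey c) then
        if pll < ((normKey c).length : Int) then (c, ((normKey c).length : Int)) else (plm, pll)
      else (plm, pll)) = passLookupStep lookup (plm, pll) c := by
  by_cases hlk : lookup = []
  · by_cases hck : normKey c = []
    · simp [passLookupStep, hck, hlk]
    · have hsw : PySem.Chars.startswith [] (normKey c) = false := by
        cases h : PySem.Chars.startswith [] (normKey c) with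
        | false => rfl
        | true => exact absurd ((startswith_nil_iff _).mp h) hck
      simp [passLookupStep, hck, hlk, hsw]
  · by_cases hck : normKey c = []
    · simp [passLookupStep, hck, hlk]
    · by_cases hsw : PySem.Chars.startswith lookup (normKey c) = true
      · by_cases hlt : pll < ((normKey c).length : Int) <;>
          simp [passLookupStep, hck, hlk, hsw, hlt]
      · simp [passLookupStep, hck, hlk, hsw]

lemma elFinal_cons (lookup : List Char) (c : String) (rest : List String) (el : String) :
    elFinal lookup (c :: rest) el =
      elFinal lookup rest (if lookup ≠ [] ∧ lookup = normKey c then c else el) := by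
  by_cases hlk : lookup = []
  · simp [elFinal, hlk]
  · simp only [elFinal, hlk, ne_eq, not_false_eq_true, if_true, true_and]
    rw [List.reverse_cons, List.find?_append]
    cases hf : rest.reverse.find? (fun c => normKey c == lookup) with
    | some x => simp
    | none =>
      by_cases hq : normKey c = lookup
      · have h1 : (normKey c == lookup) = true := by simp [hq]
        rw [if_pos hq.symm]
        simp [List.find?, h1]
      · have h1 : (normKey c == lookup) = false := by simp [hq]
        have h2 : ¬ lookup = normKey c := fun h => hq h.symm
        simp [List.find?, h1, h2]

-- with an empty lookup, pass 4's fold is the identity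
lemma foldLookup_nil_id (known : List String) (acc : String × Int) :
    known.foldl (passLookupStep []) acc = acc := by
  induction known generalizing acc with
  | nil => rfl
  | cons c rest ih =>
    have hstep : passLookupStep [] acc c = acc := by
      by_cases hck : normKey c = []
      · simp [passLookupStep, hck]
      · have hsw : PySem.Chars.startswith [] (normKey c) = false := by
          cases h : PySem.Chars.startswith [] (normKey c) with
          | false => rfl
          | true => exact absurd ((startswith_nil_iff _).mp h) hck
        simp [passLookupStep, hck, hsw]
    rw [List.foldl_cons, hstep, ih]

-- one step of A's loop shifts the accumulators of B's generalized tail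
lemma altCore_cons (lowered lookup : List Char) (text : String)
    (el pm plm : String) (pll : Int) (c : String) (rest : List String)
    (hex : ¬ lowered = PySem.Chars.lower c.toList) :
    altCore lowered lookup text el pm plm pll (c :: rest) =
      altCore lowered lookup text
        (if lookup ≠ [] ∧ lookup = normKey c then c else el)
        (passPrefixStep lowered pm c)
        (passLookupStep lookup (plm, pll) c).1
        (passLookupStep lookup (plm, pll) c).2 rest := by
  have hbeq : (PySem.Chars.lower c.toList == lowered) = false := by
    simp only [beq_eq_false_iff_ne, ne_eq]
    exact fun h => hex h.symm
  have hfc : List.find? (fun c => PySem.Chars.lower c.toList == lowered) (c :: rest) =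
      List.find? (fun c => PySem.Chars.lower c.toList == lowered) rest := by
    simp [List.find?, hbeq]
  unfold altCore
  rw [hfc, elFinal_cons, List.foldl_cons, List.foldl_cons]

-- A's finalize-after-loop equals B's generalized tail, for lists of nonempty candidates
lemma loopA_eq_altCore (lowered lookup : List Char) (text : String) :
    ∀ (known : List String), (∀ c ∈ known, c ≠ "") → ∀ (el pm plm : String) (pll : Int),
      (let st := loopA lowered lookup ("", el, pm, plm, pll) known
       if st.1 ≠ "" then st.1
       else if st.2.1 ≠ "" then st.2.1
       else if st.2.2.1 ≠ "" then st.2.2.1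
       else if st.2.2.2.1 ≠ "" then st.2.2.2.1
       else text) = altCore lowered lookup text el pm plm pll known := by
  intro known
  induction known with
  | nil =>
    intro _ el pm plm pll
    simp only [loopA, altCore, List.find?_nil, List.foldl_nil, elFinal, List.reverse_nil]
    by_cases hlk : lookup = [] <;> simp [hlk]
  | cons c rest ih =>
    intro hne el pm plm pll
    have hc : c ≠ "" := hne c (List.mem_cons_self ..)
    have hrest : ∀ x ∈ rest, x ≠ "" := fun x hx => hne x (List.mem_cons_of_mem _ hx)
    by_cases hex : lowered = PySem.Chars.lower c.toList
    · -- exact match: A breaks with exact_match = c, B's pass-1 find? returns c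
      have hfc : List.find? (fun c => PySem.Chars.lower c.toList == lowered) (c :: rest) =
          some c := by
        simp [List.find?, hex.symm]
      simp only [loopA, if_pos hex]
      unfold altCore
      rw [hfc]
      simp [hc]
    · simp only [loopA, if_neg hex]
      rw [ih hrest, stepLookup_eq]
      exact (altCore_cons lowered lookup text el pm plm pll c rest hex).symm

-- every element of knownValues is a nonempty string
lemma knownValues_ne (known_keys : Option (List String)) :
    ∀ c ∈ knownValues known_keys, c ≠ "" := by
  cases known_keys with
  | none => simp [knownValues]
  | some l =>
    simp only [knownValues]
    by_cases hl : l = []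
    · simp [hl]
    · rw [if_neg hl]
      have key : ∀ (m : List String) (acc : List String), (∀ c ∈ acc, c ≠ "") →
          ∀ c ∈ m.foldl (fun values item =>
              let t := PySem.Str.strip (if item = "" then "" else item)
              if t ≠ "" ∧ t ∉ values then values ++ [t] else values) acc, c ≠ "" := by
        intro m
        induction m with
        | nil => intro acc hacc; simpa using hacc
        | cons x xs ih =>
          intro acc hacc
          rw [List.foldl_cons]
          apply ih
          intro c hcm
          by_cases h : PySem.Str.strip (if x = "" then "" else x) ≠ "" ∧
              PySem.Str.strip (if x = "" then "" else x) ∉ acc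
          · simp only at hcm
            rw [if_pos h] at hcm
            rcases List.mem_append.mp hcm with h1 | h2
            · exact hacc c h1
            · simp only [List.mem_singleton] at h2; subst h2; exact h.1
          · simp only at hcm
            rw [if_neg h] at hcm
            exact hacc c hcm
      exact key l [] (by simp)

-- B's body equals the generalized tail at the initial accumulators
lemma alt_eq_altCore (text : String) (known : List String) (hne : ∀ c ∈ known, c ≠ "")
    (lowered lookup : List Char) :
    (match known.find? (fun c => PySem.Chars.lower c.toList == lowered) with
     | some c => c
     | none =>
       match (if lookup ≠ [] then known.reverse.find? (fun c => normKey c == lookup) else none) with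
       | some c => c
       | none =>
         let best := known.foldl (passPrefixStep lowered) ""
         if best ≠ "" then best
         else
           let best4 := if lookup ≠ [] then known.foldl (passLookupStep lookup) ("", -1) else ("", -1)
           if best4.1 ≠ "" then best4.1 else text) =
    altCore lowered lookup text "" "" "" (-1) known := by
  unfold altCore
  cases hf : known.find? (fun c => PySem.Chars.lower c.toList == lowered) with
  | some c => rfl
  | none =>
    simp only []
    cases hg : (if lookup ≠ [] then known.reverse.find? (fun c => normKey c == lookup) else none) with
    | some c =>
      have hc : c ≠ "" := by
        by_cases hlk : lookup = []
        · simp [hlk] at hg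
        · rw [if_pos (by exact hlk)] at hg
          exact hne c (List.mem_reverse.mp (List.mem_of_find?_eq_some hg))
      simp [elFinal, hg, hc]
    | none =>
      have hel : elFinal lookup known "" = "" := by simp [elFinal, hg]
      rw [hel]
      simp only [ne_eq, not_true_eq_false, if_false]
      by_cases hlk : lookup = []
      · simp [hlk, foldLookup_nil_id]
      · simp [hlk]

-- ===== VERDICT (by name: the statement is the Claim_ definition above) =====
theorem match_known_py_spec : Claim_equal_match_known_py := by
  intro text known_keys _
  unfold Spec_match_known_py match_known_py match_known_py_alt
  by_cases hk : knownValues known_keys = []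
  · simp [hk]
  · simp only [hk, if_false]
    have hne := knownValues_ne known_keys
    rw [alt_eq_altCore text _ hne]
    exact loopA_eq_altCore _ _ text _ hne "" "" "" (-1)
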